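-- pv_equiv track=rewrite | github.com/zhangxiangxiao/xjax | xjax/xnn.py | pack_states_list
-- ===== SOURCE A (Python) =====
-- def pack_states(states):
--     """Pack states for container."""
--     new_states = {}
--     for i in (states if states is not None else {}):
--         for key in (states[i] if states[i] is not None else {}):
--             if key not in new_states:
--                 new_states[key] = {i: states[i][key]}
--             else:
--                 new_states[key][i] = states[i][key]
--     if len(new_states) == 0:
--         new_states = None
--     return new_states
--
-- def pack_states_list(states):
--     """Pack states list for container."""
--     new_states = {}
--     if states is not None:
--         for i in range(len(states)):
--             new_states[i] = states[i]
--     if len(new_states) == 0: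
--         new_states = None
--     return pack_states(new_states)
-- ===== SOURCE B (Python) =====
-- def pack_states_list(states):
--     """Pack states list for container (key-outer rebuild)."""
--     rows = list(enumerate(states)) if states is not None else []
--     keys = []
--     seen = set()
--     for _, elem in rows:
--         if elem is not None:
--             for k in elem:
--                 if k not in seen:
--                     seen.add(k)
--                     keys.append(k)
--     new_states = {k: {i: elem[k] for i, elem in rows
--                       if elem is not None and k in elem}
--                   for k in keys}
--     return new_states or None
-- ===== Notes on version B (the rewrite author's own statement) =====
-- stated objective: simpler
-- what changed: Replaces A's two-function composition (build an index-keyed dict, then an index-outer/key-inner transposing fold with insert-or-mutate branches) by a key-outer rebuild: one pass collects the inner keys in first-encounter order, then a single dict comprehension per key gathers its (index, value) pairs.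
import Mathlib
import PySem

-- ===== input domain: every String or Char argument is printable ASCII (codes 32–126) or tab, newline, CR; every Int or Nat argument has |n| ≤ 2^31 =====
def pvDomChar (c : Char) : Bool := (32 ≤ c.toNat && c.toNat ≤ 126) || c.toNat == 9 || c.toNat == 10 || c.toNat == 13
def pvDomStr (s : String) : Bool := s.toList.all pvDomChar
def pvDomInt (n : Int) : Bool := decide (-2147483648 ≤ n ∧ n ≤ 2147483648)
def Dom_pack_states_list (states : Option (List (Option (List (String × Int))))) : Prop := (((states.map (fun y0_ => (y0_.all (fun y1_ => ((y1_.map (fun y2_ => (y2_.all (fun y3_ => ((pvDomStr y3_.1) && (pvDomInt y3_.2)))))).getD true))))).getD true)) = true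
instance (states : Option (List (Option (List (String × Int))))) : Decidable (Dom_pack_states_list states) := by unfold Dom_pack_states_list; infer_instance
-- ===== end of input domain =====

-- B re-keys the nested dicts with the loop nesting inverted (key-outer instead of index-outer), for a simpler one-comprehension build; return value only, neither version mutates its argument.

-- ===== PORT A =====
-- A's same-module helper pack_states; its dict argument is a PySem.Dict keyed by the list index.
def pack_states_A (statesD : Option (PySem.Dict Int (Option (List (String × Int))))) :
    Option (List (String × List (Int × Int))) :=
  let d := match statesD with | none => PySem.Dict.empty | some d => d
  let ns : PySem.Dict String (PySem.Dict Int Int) :=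
    d.keys.foldl (fun ns i =>
      let row : PySem.Dict String Int := match d.getD i none with
        | none => PySem.Dict.empty
        | some lst => PySem.Dict.ofList lst
      row.keys.foldl (fun ns key =>
        if ns.contains key = false then
          ns.insert key (PySem.Dict.ofList [(i, row.getD key 0)])
        else
          ns.insert key ((ns.getD key PySem.Dict.empty).insert i (row.getD key 0))) ns)
      PySem.Dict.empty
  if ns.size = 0 then none else some (ns.items.map (fun p => (p.1, p.2.items)))

def pack_states_list (states : Option (List (Option (List (String × Int))))) :
    Option (List (String × List (Int × Int))) :=
  let ns : PySem.Dict Int (Option (List (String × Int))) :=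
    match states with
    | none => PySem.Dict.empty
    | some xs => (PySem.List.pyRange 0 (PySem.List.len xs)).foldl
        (fun dd i => dd.insert i (PySem.List.pyGetD xs i none)) PySem.Dict.empty
  pack_states_A (if ns.size = 0 then none else some ns)

-- ===== PORT B =====
def pack_states_list_alt (states : Option (List (Option (List (String × Int))))) :
    Option (List (String × List (Int × Int))) :=
  let rows : List (Int × Option (List (String × Int))) :=
    match states with | none => [] | some xs => PySem.List.enumerate xs
  -- seen-set + keys-list loop: PySem.Set keeps first-insertion order
  let keys : PySem.Set String :=
    rows.foldl (fun seen r =>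
      match r.2 with
      | none => seen
      | some lst => PySem.Set.update seen (PySem.Dict.ofList lst).keys) PySem.Set.empty
  -- {i: elem[k] for i, elem in rows if elem is not None and k in elem}: distinct keys i, so its
  -- items list is exactly this filterMap
  let new_states : List (String × List (Int × Int)) :=
    keys.map (fun k => (k,
      rows.filterMap (fun r =>
        match r.2 with
        | none => none
        | some lst => ((PySem.Dict.ofList lst).get? k).map (fun v => (r.1, v)))))
  if new_states = [] then none else some new_states

-- ===== PRECONDITION & SPEC =====
def Spec_pack_states_list (states : Option (List (Option (List (String × Int))))) (out : Option (List (String × List (Int × Int)))) : Prop := out = pack_states_list_alt states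
instance (states : Option (List (Option (List (String × Int))))) (out : Option (List (String × List (Int × Int)))) : Decidable (Spec_pack_states_list states out) := by unfold Spec_pack_states_list; infer_instance

-- ===== CLAIM (what is proved, stated in full; the proofs are below) =====
def Claim_equal_pack_states_list : Prop := ∀ (states : Option (List (Option (List (String × Int))))), Dom_pack_states_list states → Spec_pack_states_list states (pack_states_list states)

-- ===== LEMMAS AND PROOFS =====

-- the dict a row (an Option assoc list) denotes
def pvRowD (r : Option (List (String × Int))) : PySem.Dict String Int :=
  match r with
  | none => PySem.Dict.empty
  | some lst => PySem.Dict.ofList lst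

-- A's nested loop, abstracted over the enumerated rows
def pvStep (ns : PySem.Dict String (PySem.Dict Int Int))
    (r : Int × Option (List (String × Int))) : PySem.Dict String (PySem.Dict Int Int) :=
  (pvRowD r.2).keys.foldl (fun ns key =>
    if ns.contains key = false then
      ns.insert key (PySem.Dict.ofList [(r.1, (pvRowD r.2).getD key 0)])
    else
      ns.insert key ((ns.getD key PySem.Dict.empty).insert r.1 ((pvRowD r.2).getD key 0))) ns

def pvFold (rows : List (Int × Option (List (String × Int)))) : PySem.Dict String (PySem.Dict Int Int) :=
  rows.foldl pvStep PySem.Dict.empty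

def pvKeys (rows : List (Int × Option (List (String × Int)))) : PySem.Set String :=
  rows.foldl (fun s r => PySem.Set.update s (pvRowD r.2).keys) PySem.Set.empty

def pvSub (rows : List (Int × Option (List (String × Int)))) (k : String) : List (Int × Int) :=
  rows.filterMap (fun r => ((pvRowD r.2).get? k).map (fun v => (r.1, v)))

theorem pvStep_eq (ns : PySem.Dict String (PySem.Dict Int Int))
    (r : Int × Option (List (String × Int))) :
    pvStep ns r = (pvRowD r.2).keys.foldl (fun ns key => ns.insert key
      (if ns.contains key = false then PySem.Dict.ofList [(r.1, (pvRowD r.2).getD key 0)]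
       else (ns.getD key PySem.Dict.empty).insert r.1 ((pvRowD r.2).getD key 0))) ns := by
  unfold pvStep
  congr 1
  funext ns key
  split <;> rfl

theorem pvFold_keys_aux (rows : List (Int × Option (List (String × Int))))
    (ns : PySem.Dict String (PySem.Dict Int Int)) (hnd : ns.keys.Nodup) :
    (rows.foldl pvStep ns).keys
      = rows.foldl (fun s r => PySem.Set.update s (pvRowD r.2).keys) ns.keys ∧
    (rows.foldl pvStep ns).keys.Nodup := by
  induction rows generalizing ns with
  | nil => exact ⟨rfl, hnd⟩
  | cons r t ih =>
    simp only [List.foldl_cons]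
    have hk : (pvStep ns r).keys = PySem.Set.update ns.keys (pvRowD r.2).keys := by
      rw [pvStep_eq]
      exact PySem.Dict.keys_foldl_insert _ _ _
    have hn : (pvStep ns r).keys.Nodup := by
      rw [pvStep_eq]
      exact PySem.Dict.nodup_keys_foldl_insert _ _ _ hnd
    rcases ih (pvStep ns r) hn with ⟨h1, h2⟩
    exact ⟨by rw [h1, hk], h2⟩

theorem pvFold_keys (rows : List (Int × Option (List (String × Int)))) :
    (pvFold rows).keys = pvKeys rows ∧ (pvFold rows).keys.Nodup := by
  have := pvFold_keys_aux rows PySem.Dict.empty (by simp [pysem])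
  simpa [pvFold, pvKeys, PySem.Set.empty] using this

theorem pvInner (i : Int) (d0 : PySem.Dict String Int) (ks : List String) (hnd : ks.Nodup)
    (ns : PySem.Dict String (PySem.Dict Int Int))
    (hfresh : ∀ k ∈ ks, i ∉ (ns.getD k PySem.Dict.empty).items.map Prod.fst) (k : String) :
    ((ks.foldl (fun ns key =>
        if ns.contains key = false then
          ns.insert key (PySem.Dict.ofList [(i, d0.getD key 0)])
        else
          ns.insert key ((ns.getD key PySem.Dict.empty).insert i (d0.getD key 0))) ns).getD
        k PySem.Dict.empty).items
      = (ns.getD k PySem.Dict.empty).items ++ (if k ∈ ks then [(i, d0.getD k 0)] else []) := by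
  induction ks generalizing ns with
  | nil => simp
  | cons a t ih =>
    simp only [List.foldl_cons]
    set ns' := (if ns.contains a = false then
          ns.insert a (PySem.Dict.ofList [(i, d0.getD a 0)])
        else
          ns.insert a ((ns.getD a PySem.Dict.empty).insert i (d0.getD a 0))) with hns'
    have hgetD : ∀ k', ns'.getD k' PySem.Dict.empty =
        if k' = a then
          (if ns.contains a = false then PySem.Dict.ofList [(i, d0.getD a 0)]
           else (ns.getD a PySem.Dict.empty).insert i (d0.getD a 0))
        else ns.getD k' PySem.Dict.empty := by
      intro k'
      rw [hns']
      split <;> rw [PySem.Dict.getD_insert]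
    have hA : (ns'.getD a PySem.Dict.empty).items
        = (ns.getD a PySem.Dict.empty).items ++ [(i, d0.getD a 0)] := by
      rw [hgetD a, if_pos rfl]
      by_cases hc : ns.contains a = false
      · rw [if_pos hc, PySem.Dict.getD_of_not_contains _ _ hc]
        rfl
      · rw [if_neg hc]
        have hic : (ns.getD a PySem.Dict.empty).contains i = false := by
          by_contra hcc
          have : (ns.getD a PySem.Dict.empty).contains i = true := by
            revert hcc; cases (ns.getD a PySem.Dict.empty).contains i <;> simp
          have hm := (PySem.Dict.contains_iff_mem_keys _ _).mp this
          exact hfresh a (by simp) (by simpa [PySem.Dict.keys] using hm)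
        exact PySem.Dict.items_insert_of_not_contains _ _ hic
    have hfresh' : ∀ k' ∈ t, i ∉ (ns'.getD k' PySem.Dict.empty).items.map Prod.fst := by
      intro k' hk'
      have hne : k' ≠ a := by
        rintro rfl; exact (List.nodup_cons.mp hnd).1 hk'
      rw [hgetD k', if_neg hne]
      exact hfresh k' (List.mem_cons_of_mem _ hk')
    rw [ih (List.nodup_cons.mp hnd).2 ns' hfresh']
    by_cases hk : k = a
    · subst hk
      have hkt : k ∉ t := (List.nodup_cons.mp hnd).1
      simp [hA, hkt]
    · rw [hgetD k, if_neg hk]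
      by_cases hkt : k ∈ t <;> simp [hk, hkt]

theorem pvSub_fst (rows : List (Int × Option (List (String × Int)))) (k : String) :
    ∀ p ∈ pvSub rows k, p.1 ∈ rows.map Prod.fst := by
  intro p hp
  rcases List.mem_filterMap.mp hp with ⟨r, hr, he⟩
  rcases Option.map_eq_some_iff.mp he with ⟨v, _, rfl⟩
  exact List.mem_map.mpr ⟨r, hr, rfl⟩

theorem pvRowD_keys_nodup (r : Option (List (String × Int))) : (pvRowD r).keys.Nodup := by
  cases r with
  | none => simp [pvRowD, pysem]
  | some lst => exact PySem.Dict.nodup_keys_ofList lst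

theorem pvFold_getD (rows : List (Int × Option (List (String × Int)))) :
    (rows.map Prod.fst).Nodup → ∀ k,
    ((pvFold rows).getD k PySem.Dict.empty).items = pvSub rows k := by
  induction rows using List.reverseRecOn with
  | nil => intro _ k; rfl
  | append_singleton rows r ih =>
    intro h k
    have hmap : ((rows ++ [r]).map Prod.fst) = rows.map Prod.fst ++ [r.1] := by simp
    have hnd : (rows.map Prod.fst).Nodup ∧ r.1 ∉ rows.map Prod.fst := by
      rw [hmap] at h
      rcases List.nodup_append.mp h with ⟨h1, h2, h3⟩
      exact ⟨h1, fun hm => (h3 _ hm r.1 (by simp)) rfl⟩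
    have hfold : pvFold (rows ++ [r]) = pvStep (pvFold rows) r := by
      simp [pvFold, List.foldl_append]
    have hfresh : ∀ k' ∈ (pvRowD r.2).keys,
        r.1 ∉ ((pvFold rows).getD k' PySem.Dict.empty).items.map Prod.fst := by
      intro k' _ hm
      rcases List.mem_map.mp hm with ⟨p, hp, hpe⟩
      rw [ih hnd.1 k'] at hp
      exact hnd.2 (hpe ▸ pvSub_fst rows k' p hp)
    rw [hfold]
    unfold pvStep
    rw [pvInner r.1 (pvRowD r.2) (pvRowD r.2).keys (pvRowD_keys_nodup r.2) _ hfresh k]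
    rw [ih hnd.1 k]
    have hsub : pvSub (rows ++ [r]) k = pvSub rows k ++ pvSub [r] k := by
      simp [pvSub]
    rw [hsub]
    congr 1
    cases hg : (pvRowD r.2).get? k with
    | none =>
      have hk : k ∉ (pvRowD r.2).keys :=
        (PySem.Dict.get?_eq_none_iff_not_mem_keys _ _).mp hg
      simp [pvSub, hg, hk]
    | some v =>
      have hk : k ∈ (pvRowD r.2).keys := by
        by_contra hkn
        rw [(PySem.Dict.get?_eq_none_iff_not_mem_keys _ _).mpr hkn] at hg
        simp at hg
      have hv : (pvRowD r.2).getD k 0 = v := PySem.Dict.getD_of_get?_eq_some _ _ hg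
      simp [pvSub, hg, hk, hv]

-- the enumerated rows the A-side index dict denotes
def pvRows (xs : List (Option (List (String × Int)))) : List (Int × Option (List (String × Int))) :=
  (PySem.List.pyRange 0 (PySem.List.len xs)).map (fun i => (i, PySem.List.pyGetD xs i none))

theorem pvRange_nodup (xs : List (Option (List (String × Int)))) :
    (PySem.List.pyRange 0 (PySem.List.len xs)).Nodup := by
  rw [show PySem.List.len xs = ((xs.length : Nat) : Int) from rfl,
    PySem.List.pyRange_zero_natCast]
  exact (List.nodup_range).map (fun a b => by omega)

theorem pvRows_fst (xs : List (Option (List (String × Int)))) :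
    (pvRows xs).map Prod.fst = PySem.List.pyRange 0 (PySem.List.len xs) := by
  simp [pvRows, Function.comp_def]

theorem pvDict_items (xs : List (Option (List (String × Int)))) :
    ((PySem.List.pyRange 0 (PySem.List.len xs)).foldl
      (fun dd i => dd.insert i (PySem.List.pyGetD xs i none)) PySem.Dict.empty).items
      = pvRows xs := by
  have h := PySem.Dict.items_foldl_insert_fresh (PySem.List.pyRange 0 (PySem.List.len xs))
    (fun i => i) (fun i => PySem.List.pyGetD xs i none) PySem.Dict.empty
    (fun a _ => rfl) (by simpa using pvRange_nodup xs)
  simpa [pvRows] using h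

theorem pvPackA_drop_if (d : PySem.Dict Int (Option (List (String × Int)))) :
    pack_states_A (if d.size = 0 then none else some d) = pack_states_A (some d) := by
  by_cases h : d.size = 0
  · have hit : d.items = [] := List.length_eq_zero_iff.mp h
    have hd : d = PySem.Dict.empty := PySem.Dict.ext hit
    rw [if_pos h, hd]
    rfl
  · rw [if_neg h]

-- A's outer loop over the index dict is the abstract rows fold
theorem pvA_fold_eq (d : PySem.Dict Int (Option (List (String × Int))))
    (R : List (Int × Option (List (String × Int))))
    (hitems : d.items = R) (hknd : d.keys.Nodup) :
    d.keys.foldl (fun ns i =>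
      let row : PySem.Dict String Int := match d.getD i none with
        | none => PySem.Dict.empty
        | some lst => PySem.Dict.ofList lst
      row.keys.foldl (fun ns key =>
        if ns.contains key = false then
          ns.insert key (PySem.Dict.ofList [(i, row.getD key 0)])
        else
          ns.insert key ((ns.getD key PySem.Dict.empty).insert i (row.getD key 0))) ns)
      PySem.Dict.empty
    = pvFold R := by
  have hkeys : d.keys = R.map Prod.fst := by simp only [PySem.Dict.keys, hitems]
  have hgd : ∀ r ∈ R, d.getD r.1 none = r.2 := by
    intro r hr
    have hm : (r.1, r.2) ∈ d.items := by rw [hitems]; simpa using hr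
    exact PySem.Dict.getD_of_mem_items d hm hknd none
  rw [hkeys, List.foldl_map]
  exact PySem.List.foldl_congr_mem _ _ _ _ (fun acc r hr => by rw [hgd r hr]; rfl)

theorem pvA_eq (xs : List (Option (List (String × Int)))) :
    pack_states_list (some xs)
      = (if (pvFold (pvRows xs)).size = 0 then none
         else some ((pvFold (pvRows xs)).items.map (fun p => (p.1, p.2.items)))) := by
  show pack_states_A _ = _
  rw [pvPackA_drop_if]
  show (if _ then none else some _) = _
  rw [pvA_fold_eq _ (pvRows xs) (pvDict_items xs)
    (by simp only [PySem.Dict.keys, pvDict_items xs, pvRows_fst]; exact pvRange_nodup xs)]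

-- B, on some xs, in terms of the same abstractions
theorem pvB_eq (xs : List (Option (List (String × Int)))) :
    pack_states_list_alt (some xs)
      = (if ((pvKeys (pvRows xs)).map (fun k => (k, pvSub (pvRows xs) k)) :
            List (String × List (Int × Int))) = [] then none
         else some ((pvKeys (pvRows xs)).map (fun k => (k, pvSub (pvRows xs) k)))) := by
  show (if _ then none else some _) = _
  have hrows : PySem.List.enumerate xs = pvRows xs :=
    PySem.List.enumerate_eq_map_pyRange xs none
  have hkeys : (PySem.List.enumerate xs).foldl (fun seen r =>
      match r.2 with
      | none => seen
      | some lst => PySem.Set.update seen (PySem.Dict.ofList lst).keys) PySem.Set.empty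
      = pvKeys (pvRows xs) := by
    rw [hrows]
    exact PySem.List.foldl_congr_mem _ _ _ _ (fun acc r _ => by
      rcases r with ⟨i, row⟩; cases row <;> rfl)
  have hsub : ∀ k, (PySem.List.enumerate xs).filterMap (fun r =>
      match r.2 with
      | none => none
      | some lst => ((PySem.Dict.ofList lst).get? k).map (fun v => (r.1, v)))
      = pvSub (pvRows xs) k := by
    intro k
    rw [hrows, pvSub]
    exact List.filterMap_congr (fun r _ => by
      rcases r with ⟨i, row⟩; cases row <;> rfl)
  simp only [hkeys]
  have hmap : ((pvKeys (pvRows xs)).map (fun k => (k, (PySem.List.enumerate xs).filterMap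
      (fun r => match r.2 with
        | none => none
        | some lst => ((PySem.Dict.ofList lst).get? k).map (fun v => (r.1, v))))))
      = (pvKeys (pvRows xs)).map (fun k => (k, pvSub (pvRows xs) k)) :=
    List.map_congr_left (fun k _ => by rw [hsub k])
  rw [hmap]

theorem pack_states_list_spec : Claim_equal_pack_states_list := by
  intro states _
  unfold Spec_pack_states_list
  cases states with
  | none => rfl
  | some xs =>
    rw [pvA_eq, pvB_eq]
    have hnd : ((pvRows xs).map Prod.fst).Nodup := by
      rw [pvRows_fst]; exact pvRange_nodup xs
    rcases pvFold_keys (pvRows xs) with ⟨hk, hknd⟩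
    have hitems : (pvFold (pvRows xs)).items.map (fun p => (p.1, p.2.items))
        = (pvKeys (pvRows xs)).map (fun k => (k, pvSub (pvRows xs) k)) := by
      rw [PySem.Dict.items_eq_map_keys _ hknd PySem.Dict.empty, hk, List.map_map]
      exact List.map_congr_left (fun k _ => by
        simp only [Function.comp]
        rw [pvFold_getD (pvRows xs) hnd k])
    have hsize : ((pvFold (pvRows xs)).size = 0)
        ↔ ((pvKeys (pvRows xs)).map (fun k => (k, pvSub (pvRows xs) k)) :
            List (String × List (Int × Int))) = [] := by
      rw [← hitems]
      show (pvFold (pvRows xs)).items.length = 0 ↔ _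
      simp
    by_cases h : (pvFold (pvRows xs)).size = 0
    · rw [if_pos h, if_pos (hsize.mp h)]
    · rw [if_neg h, if_neg (fun he => h (hsize.mpr he)), hitems]
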